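-- pv_equiv track=rewrite | github.com/olsenw/LeetCodeExercises | Python3/minimum_number_of_operations_to_move_all_balls_to_each_box.py | minOperations_brute
-- ===== SOURCE A (Python) =====
-- from typing import List, Dict, Set, Optional
--
-- def minOperations_brute(boxes: str) -> List[int]:
--     n = len(boxes)
--     answer = []
--     for i in range(n):
--         a = 0
--         for j in range(n):
--             if boxes[j] == '1':
--                 a += abs(i - j)
--         answer.append(a)
--     return answer
-- ===== SOURCE B (Python) =====
-- from typing import List, Dict, Set, Optional
--
-- def _costs(s: str) -> List[int]:
--     # costs[i] = total cost of moving every '1' at an index < i to position i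
--     res = []
--     cnt = 0
--     cost = 0
--     for c in s:
--         res.append(cost)
--         cnt += c == '1'
--         cost += cnt
--     return res
--
-- def minOperations_brute(boxes: str) -> List[int]:
--     left = _costs(boxes)
--     right = _costs(boxes[::-1])
--     right.reverse()
--     return [l + r for l, r in zip(left, right)]
-- ===== Notes on version B (the rewrite author's own statement) =====
-- stated objective: faster
-- what changed: Replaced the quadratic all-pairs distance scan with two linear prefix passes that maintain a running ball count and running cost from each side, summing the left and right costs per index.
import Mathlib
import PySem

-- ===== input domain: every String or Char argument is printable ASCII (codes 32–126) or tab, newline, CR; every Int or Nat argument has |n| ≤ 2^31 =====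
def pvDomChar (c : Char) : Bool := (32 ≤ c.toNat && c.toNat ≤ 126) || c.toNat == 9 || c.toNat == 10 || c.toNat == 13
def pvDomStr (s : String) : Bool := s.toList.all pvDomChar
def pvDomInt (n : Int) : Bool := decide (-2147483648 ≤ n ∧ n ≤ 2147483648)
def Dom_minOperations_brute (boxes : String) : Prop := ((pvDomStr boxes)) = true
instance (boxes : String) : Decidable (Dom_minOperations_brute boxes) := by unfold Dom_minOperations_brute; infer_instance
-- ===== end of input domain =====

-- B replaces A's quadratic all-pairs scan with two O(n) prefix passes (running ball count and cost from each side).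

-- ===== PORT A =====
-- for i in range(n): a = 0; for j in range(n): if boxes[j]=='1': a += abs(i-j); append a
def minOperations_brute (boxes : String) : List Int :=
  let cs := boxes.toList
  let n := cs.length
  (List.range n).map (fun (i : Nat) =>
    (List.range n).foldl (fun (a : Int) (j : Nat) =>
      if PySem.List.pyGet? cs (j : Int) = some '1' then a + |(i : Int) - (j : Int)| else a) 0)

-- ===== PORT B =====
-- _costs: one forward pass; res.append(cost); cnt += c == '1'; cost += cnt
def pvCosts : List Char → Int → Int → List Int
  | [], _, _ => []
  | c :: rest, cnt, cost =>
      let cnt' := cnt + (if c = '1' then 1 else 0)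
      cost :: pvCosts rest cnt' (cost + cnt')

def minOperations_brute_alt (boxes : String) : List Int :=
  let cs := boxes.toList
  let left := pvCosts cs 0 0
  let right := (pvCosts cs.reverse 0 0).reverse
  List.zipWith (· + ·) left right

-- ===== PRECONDITION & SPEC =====
def Spec_minOperations_brute (boxes : String) (out : List Int) : Prop := out = minOperations_brute_alt boxes
instance (boxes : String) (out : List Int) : Decidable (Spec_minOperations_brute boxes out) := by unfold Spec_minOperations_brute; infer_instance

-- ===== CLAIM (what is proved, stated in full; the proofs are below) =====
def Claim_equal_minOperations_brute : Prop := ∀ (boxes : String), Dom_minOperations_brute boxes → Spec_minOperations_brute boxes (minOperations_brute boxes)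

-- ===== LEMMAS AND PROOFS =====

-- weighted one-sided cost sum: cost at position k of the balls strictly left of k
def pvS (cs : List Char) (k : Nat) : Int :=
  ∑ j ∈ Finset.range k, (if cs[j]? = some '1' then ((k : Int) - (j : Int)) else 0)

theorem pvCosts_length (cs : List Char) (cnt cost : Int) :
    (pvCosts cs cnt cost).length = cs.length := by
  induction cs generalizing cnt cost with
  | nil => rfl
  | cons c rest ih => simp [pvCosts, ih]

theorem pvS_cons (c : Char) (rest : List Char) (k : Nat) :
    pvS (c :: rest) (k + 1)
      = ((k : Int) + 1) * (if c = '1' then 1 else 0) + pvS rest k := by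
  unfold pvS
  rw [Finset.sum_range_succ']
  have h1 : ∀ j ∈ Finset.range k,
      (if (c :: rest)[j+1]? = some '1' then (((k+1 : Nat) : Int) - ((j+1 : Nat) : Int)) else 0)
      = (if rest[j]? = some '1' then ((k : Int) - (j : Int)) else 0) := by
    intro j _
    by_cases h : rest[j]? = some '1'
    · simp [h]
    · simp [h]
  rw [Finset.sum_congr rfl h1]
  by_cases hc : c = '1' <;> simp [hc] <;> ring

theorem pvCosts_get (cs : List Char) (cnt cost : Int) (k : Nat) (hk : k < cs.length) :
    (pvCosts cs cnt cost)[k]? = some (cost + k * cnt + pvS cs k) := by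
  induction cs generalizing cnt cost k with
  | nil => simp at hk
  | cons c rest ih =>
      cases k with
      | zero => simp [pvCosts, pvS]
      | succ k =>
          have hk' : k < rest.length := by simpa using hk
          have hrec := ih (cnt + (if c = '1' then 1 else 0))
            (cost + (cnt + (if c = '1' then 1 else 0))) k hk'
          simp only [pvCosts, List.getElem?_cons_succ]
          rw [hrec, pvS_cons]
          congr 1
          push_cast
          ring

theorem pv_sum_list (f : Nat → Int) (n : Nat) :
    ((List.range n).map f).sum = ∑ j ∈ Finset.range n, f j := by
  induction n with
  | zero => simp
  | succ n ih => rw [List.range_succ, Finset.sum_range_succ]; simp [ih]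

theorem pv_foldl (cs : List Char) (i : Int) (l : List Nat) (init : Int) :
    l.foldl (fun (a : Int) (j : Nat) =>
        if PySem.List.pyGet? cs (j : Int) = some '1' then a + |i - (j : Int)| else a) init
      = init + (l.map (fun (j : Nat) => if cs[j]? = some '1' then |i - (j : Int)| else 0)).sum := by
  induction l generalizing init with
  | nil => simp
  | cons x xs ih =>
      simp only [PySem.List.pyGet?_natCast] at ih ⊢
      simp only [List.foldl_cons, List.map_cons, List.sum_cons]
      by_cases h : cs[x]? = some '1'
      · simp only [if_pos h, ih]; ring
      · simp only [if_neg h, ih, zero_add]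

theorem pvA_get (boxes : String) (i : Nat) (hi : i < boxes.toList.length) :
    (minOperations_brute boxes)[i]? =
      some (∑ j ∈ Finset.range boxes.toList.length,
        (if boxes.toList[j]? = some '1' then |(i : Int) - (j : Int)| else 0)) := by
  unfold minOperations_brute
  rw [List.getElem?_map]
  rw [List.getElem?_range hi]
  simp only [Option.map_some]
  rw [pv_foldl, pv_sum_list]
  simp

theorem pvS_reverse (cs : List Char) (i : Nat) (hi : i < cs.length) :
    pvS cs.reverse (cs.length - 1 - i)
      = ∑ j ∈ Finset.range (cs.length - 1 - i),
          (if cs[i + 1 + j]? = some '1' then ((j : Int) + 1) else 0) := by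
  unfold pvS
  set n := cs.length with hn
  set m := n - 1 - i with hm
  rw [← Finset.sum_range_reflect]
  apply Finset.sum_congr rfl
  intro j hj
  have hjm : j < m := Finset.mem_range.mp hj
  have h1 : m - 1 - j < cs.reverse.length := by simp; omega
  rw [List.getElem?_reverse (by simpa using h1)]
  have h2 : cs.length - 1 - (m - 1 - j) = i + 1 + j := by omega
  rw [h2]
  have h3 : ((m : Int) - ((m - 1 - j : Nat) : Int)) = (j : Int) + 1 := by
    have : (m - 1 - j : Nat) = m - 1 - j := rfl
    omega
  rw [h3]

theorem pv_split (cs : List Char) (i : Nat) (hi : i < cs.length) :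
    (∑ j ∈ Finset.range cs.length,
        (if cs[j]? = some '1' then |(i : Int) - (j : Int)| else 0))
      = pvS cs i + pvS cs.reverse (cs.length - 1 - i) := by
  set n := cs.length with hn
  rw [Finset.range_eq_Ico,
    ← Finset.sum_Ico_consecutive _ (Nat.zero_le i) (le_of_lt hi)]
  congr 1
  · -- left part equals pvS cs i
    rw [← Finset.range_eq_Ico]
    unfold pvS
    apply Finset.sum_congr rfl
    intro j hj
    have hj' : j < i := Finset.mem_range.mp hj
    have habs : |(i : Int) - (j : Int)| = (i : Int) - (j : Int) :=
      abs_of_nonneg (by omega)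
    rw [habs]
  · -- right part equals pvS cs.reverse (n - 1 - i)
    rw [pvS_reverse cs i hi, Finset.sum_Ico_eq_sum_range]
    have hni : n - i = (n - 1 - i) + 1 := by omega
    rw [hni, Finset.sum_range_succ']
    have h0 : (if cs[i + 0]? = some '1' then |(i : Int) - ((i + 0 : Nat) : Int)| else 0) = 0 := by
      split <;> simp
    rw [h0, add_zero]
    apply Finset.sum_congr rfl
    intro j hj
    have hidx : i + (j + 1) = i + 1 + j := by omega
    rw [hidx]
    have habs : |(i : Int) - ((i + 1 + j : Nat) : Int)| = (j : Int) + 1 := by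
      rw [abs_sub_comm]
      rw [abs_of_nonneg (by push_cast; omega)]
      push_cast
      ring
    rw [habs]

theorem pvAlt_get (boxes : String) (i : Nat) (hi : i < boxes.toList.length) :
    (minOperations_brute_alt boxes)[i]? =
      some (pvS boxes.toList i + pvS boxes.toList.reverse (boxes.toList.length - 1 - i)) := by
  have h1 : (pvCosts boxes.toList 0 0)[i]? = some (0 + (i : Int) * 0 + pvS boxes.toList i) :=
    pvCosts_get _ _ _ _ hi
  have hlr : boxes.toList.reverse.length = boxes.toList.length := List.length_reverse
  have hl : (pvCosts boxes.toList.reverse 0 0).length = boxes.toList.length := by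
    rw [pvCosts_length, hlr]
  have h2 : (pvCosts boxes.toList.reverse 0 0).reverse[i]?
      = some (pvS boxes.toList.reverse (boxes.toList.length - 1 - i)) := by
    have hrev := List.getElem?_reverse (l := pvCosts boxes.toList.reverse 0 0) (i := i)
      (by rw [hl]; exact hi)
    rw [hrev, hl, pvCosts_get _ _ _ _ (by rw [hlr]; omega)]
    simp
  unfold minOperations_brute_alt
  rw [List.getElem?_zipWith, h1, h2]
  simp

theorem pv_len_A (boxes : String) :
    (minOperations_brute boxes).length = boxes.toList.length := by
  simp [minOperations_brute]

theorem pv_len_alt (boxes : String) :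
    (minOperations_brute_alt boxes).length = boxes.toList.length := by
  simp [minOperations_brute_alt, pvCosts_length]

-- ===== VERDICT (by name: the statement is the Claim_ definition above) =====
theorem minOperations_brute_spec : Claim_equal_minOperations_brute := by
  intro boxes _
  unfold Spec_minOperations_brute
  apply List.ext_getElem?
  intro i
  by_cases hi : i < boxes.toList.length
  · rw [pvA_get boxes i hi, pvAlt_get boxes i hi, pv_split boxes.toList i hi]
  · rw [List.getElem?_eq_none (by rw [pv_len_A]; omega),
      List.getElem?_eq_none (by rw [pv_len_alt]; omega)]
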